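-- pv_equiv track=rewrite | github.com/WillSoltani/CloudPro | infra/lib/lambdas/convert-worker/pages_to_pdf.py | pick_preview_pdf
-- ===== SOURCE A (Python) =====
-- def pick_preview_pdf(entries: list[str]) -> str | None:
--     lower_map = {name.lower(): name for name in entries}
--
--     # Priority 1: canonical QuickLook paths
--     for p in ["quicklook/preview.pdf", "preview.pdf"]:
--         if p in lower_map:
--             return lower_map[p]
--
--     # Priority 2: any entry ending with preview.pdf (locale-specific or nested paths)
--     for name in entries:
--         if name.lower().endswith("preview.pdf"):
--             return name
--
--     # Priority 3: any PDF inside a QuickLook-like directory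
--     for name in entries:
--         nl = name.lower()
--         if nl.endswith(".pdf") and ("quicklook" in nl or "qlpreview" in nl):
--             return name
--
--     # Priority 4: any embedded PDF at all (last resort for reduced-size Pages files
--     # that store a PDF thumbnail rather than a full QuickLook preview)
--     for name in entries:
--         if name.lower().endswith(".pdf"):
--             return name
--
--     return None
-- ===== SOURCE B (Python) =====
-- def pick_preview_pdf(entries: list[str]) -> str | None:
--     # Single pass maintaining candidate slots instead of a dict plus four scans.
--     p1_ql = p1_pv = p2 = p3 = p4 = None
--     for name in entries:
--         nl = name.lower()
--         if nl == "quicklook/preview.pdf":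
--             p1_ql = name  # last wins (matches dict overwrite)
--         if nl == "preview.pdf":
--             p1_pv = name  # last wins
--         if p2 is None and nl.endswith("preview.pdf"):
--             p2 = name
--         if p3 is None and nl.endswith(".pdf") and ("quicklook" in nl or "qlpreview" in nl):
--             p3 = name
--         if p4 is None and nl.endswith(".pdf"):
--             p4 = name
--     for cand in (p1_ql, p1_pv, p2, p3, p4):
--         if cand is not None:
--             return cand
--     return None
-- ===== Notes on version B (the rewrite author's own statement) =====
-- stated objective: simpler
-- what changed: Replaced the lowercase->name dict plus four separate scans with one pass holding five candidate slots (last-wins for the two canonical names, set-once for the fallback matches) and returning the first filled slot.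
import Mathlib
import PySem

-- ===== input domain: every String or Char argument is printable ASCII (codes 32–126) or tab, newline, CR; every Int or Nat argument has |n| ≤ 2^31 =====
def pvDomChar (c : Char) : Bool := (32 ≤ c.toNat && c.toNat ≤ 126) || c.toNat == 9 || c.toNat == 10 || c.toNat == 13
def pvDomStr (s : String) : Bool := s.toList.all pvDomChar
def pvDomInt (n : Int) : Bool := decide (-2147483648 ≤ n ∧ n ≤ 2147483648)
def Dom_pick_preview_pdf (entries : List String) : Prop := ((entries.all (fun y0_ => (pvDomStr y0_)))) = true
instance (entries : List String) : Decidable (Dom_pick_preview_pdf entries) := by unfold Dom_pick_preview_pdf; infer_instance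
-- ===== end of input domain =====

-- B replaces A's dict-plus-four-scans with a single pass over five candidate slots (simpler decomposition, same cost).

-- shared predicates: the literal conditions from the Python sources
def pred1ql (n : String) : Bool := PySem.Str.lower n == "quicklook/preview.pdf"
def pred1pv (n : String) : Bool := PySem.Str.lower n == "preview.pdf"
def pred2 (n : String) : Bool := PySem.Str.endswith (PySem.Str.lower n) "preview.pdf"
def pred3 (n : String) : Bool :=
  let nl := PySem.Str.lower n
  PySem.Str.endswith nl ".pdf" && (PySem.Str.isIn "quicklook" nl || PySem.Str.isIn "qlpreview" nl)
def pred4 (n : String) : Bool := PySem.Str.endswith (PySem.Str.lower n) ".pdf"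

-- ===== PORT A =====
def pick_preview_pdf (entries : List String) : Option String :=
  let lower_map : PySem.Dict String String :=
    entries.foldl (fun d name => d.insert (PySem.Str.lower name) name) PySem.Dict.empty
  match ["quicklook/preview.pdf", "preview.pdf"].find? (fun p => lower_map.contains p) with
  | some p => lower_map.get? p
  | none =>
  match entries.find? pred2 with
  | some name => some name
  | none =>
  match entries.find? pred3 with
  | some name => some name
  | none =>
  match entries.find? pred4 with
  | some name => some name
  | none => none

-- ===== PORT B =====
def pvState := Option String × Option String × Option String × Option String × Option String

def pvStep (s : pvState) (name : String) : pvState :=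
  ((if pred1ql name then some name else s.1),
   (if pred1pv name then some name else s.2.1),
   (if s.2.2.1.isNone && pred2 name then some name else s.2.2.1),
   (if s.2.2.2.1.isNone && pred3 name then some name else s.2.2.2.1),
   (if s.2.2.2.2.isNone && pred4 name then some name else s.2.2.2.2))

def pick_preview_pdf_alt (entries : List String) : Option String :=
  let st := entries.foldl pvStep (none, none, none, none, none)
  st.1.or (st.2.1.or (st.2.2.1.or (st.2.2.2.1.or st.2.2.2.2)))

-- ===== PRECONDITION & SPEC =====
def Spec_pick_preview_pdf (entries : List String) (out : Option String) : Prop := out = pick_preview_pdf_alt entries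
instance (entries : List String) (out : Option String) : Decidable (Spec_pick_preview_pdf entries out) := by unfold Spec_pick_preview_pdf; infer_instance

-- ===== CLAIM (what is proved, stated in full; the proofs are below) =====
def Claim_equal_pick_preview_pdf : Prop := ∀ (entries : List String), Dom_pick_preview_pdf entries → Spec_pick_preview_pdf entries (pick_preview_pdf entries)

-- ===== LEMMAS AND PROOFS =====

-- A's lowercase dict: looking up k yields the LAST entry whose lowercase is k
theorem getDict_eq_lastFind (l : List String) (d : PySem.Dict String String) (k : String) :
    (l.foldl (fun d name => d.insert (PySem.Str.lower name) name) d).get? k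
      = (l.reverse.find? (fun n => PySem.Str.lower n == k)).or (d.get? k) := by
  induction l generalizing d with
  | nil => simp
  | cons n l ih =>
    simp only [List.foldl_cons, ih, List.reverse_cons, List.find?_append]
    rw [Option.or_assoc]
    congr 1
    simp only [List.find?, PySem.Dict.get?_insert]
    by_cases h : PySem.Str.lower n = k
    · simp [h]
    · have hb : (PySem.Str.lower n == k) = false := beq_eq_false_iff_ne.mpr h
      rw [hb, if_neg (fun hk => h hk.symm)]
      rfl

-- B's fold: each slot is characterised (last match for priority-1 slots, first match for the rest)
theorem foldB_eq (l : List String) (a b c d e : Option String) :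
    l.foldl pvStep (a, b, c, d, e)
      = ((l.reverse.find? pred1ql).or a, (l.reverse.find? pred1pv).or b,
         c.or (l.find? pred2), d.or (l.find? pred3), e.or (l.find? pred4)) := by
  induction l generalizing a b c d e with
  | nil => simp
  | cons n l ih =>
    simp only [List.foldl_cons, pvStep, ih, List.reverse_cons, List.find?_append, List.find?]
    refine Prod.ext ?_ (Prod.ext ?_ (Prod.ext ?_ (Prod.ext ?_ ?_))) <;> simp only
    · rw [Option.or_assoc]; congr 1
      by_cases h : pred1ql n <;> simp [h]
    · rw [Option.or_assoc]; congr 1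
      by_cases h : pred1pv n <;> simp [h]
    · cases c <;> by_cases h : pred2 n <;> simp [h]
    · cases d <;> by_cases h : pred3 n <;> simp [h]
    · cases e <;> by_cases h : pred4 n <;> simp [h]

-- ===== VERDICT (by name: the statement is the Claim_ definition above) =====
theorem pick_preview_pdf_spec : Claim_equal_pick_preview_pdf := by
  intro entries _
  unfold Spec_pick_preview_pdf pick_preview_pdf pick_preview_pdf_alt
  simp only [foldB_eq, Option.or_none]
  have hql := getDict_eq_lastFind entries PySem.Dict.empty "quicklook/preview.pdf"
  have hpv := getDict_eq_lastFind entries PySem.Dict.empty "preview.pdf"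
  simp only [PySem.Dict.get?_empty, Option.or_none] at hql hpv
  simp only [List.find?, PySem.Dict.contains_eq_isSome_get?, hql, hpv]
  simp only [show (fun n => PySem.Str.lower n == "quicklook/preview.pdf") = pred1ql from rfl,
    show (fun n => PySem.Str.lower n == "preview.pdf") = pred1pv from rfl,
    Option.none_or] at hql hpv ⊢
  cases h1 : entries.reverse.find? pred1ql with
  | some x => simp [h1, hql]
  | none =>
    cases h2 : entries.reverse.find? pred1pv with
    | some y => simp [h2, hpv]
    | none =>
      simp only [Option.isSome_none, Option.none_or]
      cases entries.find? pred2 with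
      | some _ => simp
      | none =>
        cases entries.find? pred3 with
        | some _ => simp
        | none => cases entries.find? pred4 <;> simp
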